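-- pv_equiv track=rewrite | github.com/proycon/LaMachine | helpers/metadater.py | qualify
-- ===== SOURCE A (Python) =====
-- from itertools import chain
--
-- properties = { #first order properties (including collections, i.e. properties that may be specified multiple times!)
--     "doap:name": "The name of the software",
--     "doap:revision": "The full version number of the software",
--     "doap:description": "A brief description of what the software does",
--     "doap:homepage": "The homepage of the software",
--     "doap:developer": "The author of the software",
--     "doap:maintainer": "The maintainer of the software",
--     "doap:repository": "Source code repository",
--     "doap:vendor": "Vendor/publisher",
--     "doap:platform": "Platform (non-OS specific), e.g. Python, Java, Firefox, ECMA CLR",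
--     "dcterms:license": "The software license",
--     "lamachine:dependency": "A dependency",
--     "lamachine:interface": "An interface",
--     "admssw:supportsFormat": "Supported data format", #ideally range is dcterms:FileFormat, we settle for plain mimetypes for now (we can also tie this directly to an interface, which is preferred!)
--     "dcterms:created": "Date of creation",
--     "dcterms:modified": "Last modified date",
--     "foaf:logo": "Logo", #just a URL for now
--     "rad:theme": "Theme/topic/domain of the software",
--     "admssw:intendedAudience": "Intended Audience for the software",
--     "rad:keyword": "Keyword for finding the software",
--     "xhv:last": "Latest available version of the software (may be newer than the one actually installed! cf. doap:revision)",
--     "lamachine:destination": "Location where the software is installed on disk", #(we can also tie this directly to an interface, which is preferred!)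
--     "schema:operatingSystem": "The operating system on which this software works",
--     "admssw:status": "The development status of the software (e.g. alpha, beta, production, prerelease)",
--     "admssw:programmingLanguage": "Programming language in which the software is written",
-- }
--
-- alias = { #just for convenience so common fields work out of the box
--     "version": "doap:revision",
--     "latest": "xhv:last",
--     "author": "doap:developer",
--     "summary": "doap:description",
--     "home-page": "doap:homepage", #used by pip
--     "title": "doap:name",
--     "licence": "dcterms:license",
--     "mimetype": "admssw:supportsFormat",
--     "requires": "lamachine:dependency",
--     "topic": "rad:theme", #used by pip
-- }
--
-- dep_properties = {
--     "doap:name": "The name of the dependency",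
--     "lamachine:externalPlatform": "Boolean, external dependencies are dependencies in a different software ecosystem. Internal dependencies are in the same ecosystem (e.g. Python/PyPI, Java/Maven, Perl/CPAN)",
--     "lamachine:minimumVersion": "Minimum version",
--     "lamachine:maximumVersion": "Maximum version",
-- }
--
-- interface_properties = {
--     "lamachine:entrypoint": "The name of the executable, module, or an URL (depending on interfaceType)",
--     "admssw:userInterfaceType": "User Interface Type", #for now we simply predefine: api (some for of shared library), cli (command line tool),  tui (Text UI), gui (Graphical UI), wui (Web UI), rest (REST webservice), soap (SOAP webservice), xmlrpc (other XMLRPC webservice), ws (other webservice)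
--     "admssw:supportsFormat": "Supported data format", #ideally range is dcterms:FileFormat, we settle for plain mimetypes for now
--     "lamachine:destination": "Location where the software is installed on disk, may be more generic or differ from lamachine:entrypoint",
-- }
--
-- def qualify(key):
--     if ':' in key:
--         return key #already qualified
--     for qkey in chain(properties, interface_properties, dep_properties):
--         if qkey.split(':')[1].lower() == key.lower():
--             return qkey
--     for shortkey, qkey in alias.items():
--         if key.lower() == shortkey.lower():
--             return qkey
--     raise KeyError("Unable to qualify key: " + key)
-- ===== SOURCE B (Python) =====
-- from itertools import chain
--
-- properties = {
--     "doap:name": "The name of the software",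
--     "doap:revision": "The full version number of the software",
--     "doap:description": "A brief description of what the software does",
--     "doap:homepage": "The homepage of the software",
--     "doap:developer": "The author of the software",
--     "doap:maintainer": "The maintainer of the software",
--     "doap:repository": "Source code repository",
--     "doap:vendor": "Vendor/publisher",
--     "doap:platform": "Platform (non-OS specific), e.g. Python, Java, Firefox, ECMA CLR",
--     "dcterms:license": "The software license",
--     "lamachine:dependency": "A dependency",
--     "lamachine:interface": "An interface",
--     "admssw:supportsFormat": "Supported data format",
--     "dcterms:created": "Date of creation",
--     "dcterms:modified": "Last modified date",
--     "foaf:logo": "Logo",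
--     "rad:theme": "Theme/topic/domain of the software",
--     "admssw:intendedAudience": "Intended Audience for the software",
--     "rad:keyword": "Keyword for finding the software",
--     "xhv:last": "Latest available version of the software (may be newer than the one actually installed! cf. doap:revision)",
--     "lamachine:destination": "Location where the software is installed on disk",
--     "schema:operatingSystem": "The operating system on which this software works",
--     "admssw:status": "The development status of the software (e.g. alpha, beta, production, prerelease)",
--     "admssw:programmingLanguage": "Programming language in which the software is written",
-- }
--
-- alias = {
--     "version": "doap:revision",
--     "latest": "xhv:last",
--     "author": "doap:developer",
--     "summary": "doap:description",
--     "home-page": "doap:homepage",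
--     "title": "doap:name",
--     "licence": "dcterms:license",
--     "mimetype": "admssw:supportsFormat",
--     "requires": "lamachine:dependency",
--     "topic": "rad:theme",
-- }
--
-- dep_properties = {
--     "doap:name": "The name of the dependency",
--     "lamachine:externalPlatform": "Boolean, external dependencies are dependencies in a different software ecosystem.",
--     "lamachine:minimumVersion": "Minimum version",
--     "lamachine:maximumVersion": "Maximum version",
-- }
--
-- interface_properties = {
--     "lamachine:entrypoint": "The name of the executable, module, or an URL (depending on interfaceType)",
--     "admssw:userInterfaceType": "User Interface Type",
--     "admssw:supportsFormat": "Supported data format",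
--     "lamachine:destination": "Location where the software is installed on disk, may be more generic or differ from lamachine:entrypoint",
-- }
--
-- # One reverse-lookup table, built once at import time: aliases first, then the
-- # qualified-key suffixes (so property suffixes take precedence, matching the scan order).
-- _REVERSE = {}
-- for _shortkey, _qkey in alias.items():
--     _REVERSE[_shortkey.lower()] = _qkey
-- for _qkey in chain(properties, interface_properties, dep_properties):
--     _REVERSE[_qkey.split(':')[1].lower()] = _qkey
--
-- def qualify(key):
--     if ':' in key:
--         return key #already qualified
--     result = _REVERSE.get(key.lower())
--     if result is not None:
--         return result
--     raise KeyError("Unable to qualify key: " + key)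
-- ===== Notes on version B (the rewrite author's own statement) =====
-- stated objective: simpler
-- what changed: Replaces A's two per-call scanning loops (over the chained property dicts and the alias table) with a single reverse-lookup dict built once at module scope, so qualify becomes one lowercase dict lookup.
import Mathlib
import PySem

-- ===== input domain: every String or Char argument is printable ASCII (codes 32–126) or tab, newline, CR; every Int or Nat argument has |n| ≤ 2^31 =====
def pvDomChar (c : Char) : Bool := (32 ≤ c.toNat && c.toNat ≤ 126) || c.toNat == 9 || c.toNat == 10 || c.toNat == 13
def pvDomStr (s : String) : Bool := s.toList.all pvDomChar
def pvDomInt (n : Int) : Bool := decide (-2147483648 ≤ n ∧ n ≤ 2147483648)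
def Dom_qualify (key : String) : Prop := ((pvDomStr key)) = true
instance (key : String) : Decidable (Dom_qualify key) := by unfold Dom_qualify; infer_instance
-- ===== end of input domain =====

-- B replaces A's two per-call scanning loops with one reverse-lookup table built once
-- at module scope (objective: simpler/faster lookup structure); where A raises KeyError
-- both raise, excluded by Pre_.

-- module-level data (keys of the dicts, in insertion order; values are irrelevant to qualify)
def propertiesKeys : List String :=
  ["doap:name", "doap:revision", "doap:description", "doap:homepage", "doap:developer",
   "doap:maintainer", "doap:repository", "doap:vendor", "doap:platform", "dcterms:license",
   "lamachine:dependency", "lamachine:interface", "admssw:supportsFormat", "dcterms:created",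
   "dcterms:modified", "foaf:logo", "rad:theme", "admssw:intendedAudience", "rad:keyword",
   "xhv:last", "lamachine:destination", "schema:operatingSystem", "admssw:status",
   "admssw:programmingLanguage"]

def interfacePropertiesKeys : List String :=
  ["lamachine:entrypoint", "admssw:userInterfaceType", "admssw:supportsFormat",
   "lamachine:destination"]

def depPropertiesKeys : List String :=
  ["doap:name", "lamachine:externalPlatform", "lamachine:minimumVersion",
   "lamachine:maximumVersion"]

def aliasPairs : List (String × String) :=
  [("version", "doap:revision"), ("latest", "xhv:last"), ("author", "doap:developer"),
   ("summary", "doap:description"), ("home-page", "doap:homepage"), ("title", "doap:name"),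
   ("licence", "dcterms:license"), ("mimetype", "admssw:supportsFormat"),
   ("requires", "lamachine:dependency"), ("topic", "rad:theme")]

-- ===== PORT A =====
-- A's two scanning loops over a lowered key k (key.lower() is pure, computed once here)
def qualifyScanA (k : String) : String :=
  match (propertiesKeys ++ interfacePropertiesKeys ++ depPropertiesKeys).find?
      (fun qkey => PySem.Str.lower (PySem.List.pyGetD ((PySem.Str.split? qkey ":").getD []) 1 "") == k) with
  | some qkey => qkey
  | none =>
    match aliasPairs.find? (fun p => k == PySem.Str.lower p.1) with
    | some p => p.2
    | none => ""   -- Python: raise KeyError (excluded by Pre_qualify)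

def qualify (key : String) : String :=
  if PySem.Str.isIn ":" key then key  -- already qualified
  else qualifyScanA (PySem.Str.lower key)

-- ===== PORT B =====
-- the reverse-lookup table built at module scope: aliases first, then qualified-key suffixes
def qualifyReverse : PySem.Dict String String :=
  let d := aliasPairs.foldl
    (fun d p => d.insert (PySem.Str.lower p.1) p.2) PySem.Dict.empty
  (propertiesKeys ++ interfacePropertiesKeys ++ depPropertiesKeys).foldl
    (fun d qkey => d.insert (PySem.Str.lower (PySem.List.pyGetD ((PySem.Str.split? qkey ":").getD []) 1 "")) qkey) d

def qualify_alt (key : String) : String :=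
  if PySem.Str.isIn ":" key then key  -- already qualified
  else
    match qualifyReverse.get? (PySem.Str.lower key) with
    | some result => result
    | none => ""   -- Python: raise KeyError (excluded by Pre_qualify)

-- ===== PRECONDITION & SPEC =====
-- the lowered short keys both programs resolve (A raises KeyError outside this and the ':' case)
def qualifyShortKeys : List String :=
  ["version", "latest", "author", "summary", "home-page", "title", "licence", "mimetype",
   "requires", "topic",
   "name", "revision", "description", "homepage", "developer", "maintainer", "repository",
   "vendor", "platform", "license", "dependency", "interface", "supportsformat", "created",
   "modified", "logo", "theme", "intendedaudience", "keyword", "last", "destination",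
   "operatingsystem", "status", "programminglanguage",
   "entrypoint", "userinterfacetype", "externalplatform", "minimumversion", "maximumversion"]

-- Pre_ excludes exactly the inputs on which A raises KeyError (no ':' and not a known short key)
def Pre_qualify (key : String) : Prop :=
  PySem.Str.isIn ":" key = true ∨ PySem.Str.lower key ∈ qualifyShortKeys
instance (key : String) : Decidable (Pre_qualify key) := by unfold Pre_qualify; infer_instance

def pvWitness_qualify : String := "Version"

def Spec_qualify (key : String) (out : String) : Prop := out = qualify_alt key
instance (key : String) (out : String) : Decidable (Spec_qualify key out) := by unfold Spec_qualify; infer_instance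

-- ===== CLAIM (what is proved, stated in full; the proofs are below) =====
def Claim_equal_qualify : Prop := ∀ (key : String), Dom_qualify key → Pre_qualify key → Spec_qualify key (qualify key)

-- ===== LEMMAS AND PROOFS =====

-- on every known lowered short key, A's scan and B's table lookup agree
set_option maxRecDepth 8192 in
theorem qualify_scan_eq_lookup :
    ∀ k ∈ qualifyShortKeys,
      qualifyScanA k =
        (match qualifyReverse.get? k with | some result => result | none => "") := by
  decide

-- ===== VERDICT (by name: the statement is the Claim_ definition above) =====
theorem qualify_spec : Claim_equal_qualify := by
  intro key _ hpre
  unfold Spec_qualify qualify qualify_alt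
  by_cases hc : PySem.Str.isIn ":" key = true
  · rw [if_pos hc, if_pos hc]
  · rw [if_neg hc, if_neg hc]
    exact qualify_scan_eq_lookup (PySem.Str.lower key) (hpre.resolve_left hc)
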